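-- pv_equiv track=rewrite | github.com/code-cp/leetcode | solutions/1238/main.py | circularPermutation
-- ===== SOURCE A (Python) =====
-- from typing import List
--
-- def circularPermutation(n: int, start: int) -> List[int]:
--     res = []
--     # 0th gray code
--     res.append(0)
--
--     for i in range(n):
--         l = len(res)
--         # generate ith gray code
--         for j in range(l-1, -1, -1):
--             res.append(res[j] + (1<<i))
--
--     while res[0] != start:
--         res.append(res[0])
--         del res[0]
--
--     return res
-- ===== SOURCE B (Python) =====
-- from typing import List
--
-- def circularPermutation(n: int, start: int) -> List[int]:
--     # inverse Gray code of start: index k with gray(k) == start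
--     k = start
--     s = start >> 1
--     while s:
--         k ^= s
--         s >>= 1
--     N = 1 << n
--     # emit gray((k+j) mod N) in one pass
--     return [((k + j) % N) ^ (((k + j) % N) >> 1) for j in range(N)]
-- ===== Notes on version B (the rewrite author's own statement) =====
-- stated objective: alternative
-- what changed: Replaces the reflect-and-prepend Gray-list construction followed by a rotate-one-step-at-a-time loop (each step deleting the list head) by a single pass that computes the inverse-Gray index k of start and emits gray((k+j) mod 2^n) directly.
-- outside the precondition, e.g. on circularPermutation(-1, 0): A returns [0], B raises ValueError
import Mathlib
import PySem

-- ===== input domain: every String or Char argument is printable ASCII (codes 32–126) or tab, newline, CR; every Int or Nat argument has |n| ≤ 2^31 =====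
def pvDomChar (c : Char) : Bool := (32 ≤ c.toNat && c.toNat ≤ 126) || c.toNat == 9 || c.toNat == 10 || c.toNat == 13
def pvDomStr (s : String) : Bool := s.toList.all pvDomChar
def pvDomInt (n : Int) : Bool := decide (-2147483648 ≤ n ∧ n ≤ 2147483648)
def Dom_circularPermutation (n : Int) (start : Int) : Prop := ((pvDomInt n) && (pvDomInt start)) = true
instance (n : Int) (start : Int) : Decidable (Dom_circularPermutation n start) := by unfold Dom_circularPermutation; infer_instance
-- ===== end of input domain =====

-- B computes the inverse-Gray index of start and emits the rotated Gray sequence in one pass, replacing A's build-then-rotate-by-deletion; equivalence proved on Pre_.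


-- ===== PORT A =====
-- inner loop 'for j in range(l-1,-1,-1): res.append(res[j] + (1<<i))'; j is always a
-- valid nonnegative index into the growing list, so pyGetD's default is never used
def pvAInner (c : Int) (res : List Int) : List Int :=
  (PySem.List.pyRange ((res.length : Int) - 1) (-1) (-1)).foldl
    (fun r j => r ++ [PySem.List.pyGetD r j 0 + c]) res

-- 'while res[0] != start: res.append(res[0]); del res[0]' — fuel res.length suffices
-- whenever start occurs in res (Pre_); res is never empty ([0] is always there)
def pvARot : Nat → List Int → Int → List Int
  | 0, res, _ => res
  | f + 1, res, start =>
    match res with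
    | [] => []
    | h :: t => if h ≠ start then pvARot f (t ++ [h]) start else h :: t

def circularPermutation (n : Int) (start : Int) : List Int :=
  -- i ranges over range(n), so i ≥ 0 and 1<<i is 1 <<< i.toNat
  let res := (PySem.List.pyRange 0 n 1).foldl (fun r i => pvAInner (1 <<< i.toNat) r) [0]
  pvARot res.length res start

-- ===== PORT B =====
-- 'k = start; s = start >> 1; while s: k ^= s; s >>= 1' (start ≥ 0 under Pre_)
def pvInvLoop (k s : Nat) : Nat :=
  if h : s = 0 then k else pvInvLoop (k ^^^ s) (s >>> 1)
decreasing_by simp only [Nat.shiftRight_one]; omega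

def circularPermutation_alt (n : Int) (start : Int) : List Int :=
  let k := pvInvLoop start.toNat (start.toNat >>> 1)
  let N := 1 <<< n.toNat   -- N = 1 << n; n ≥ 0 under Pre_
  (List.range N).map (fun j => (((((k + j) % N) ^^^ (((k + j) % N) >>> 1)) : Nat) : Int))

-- ===== PRECONDITION & SPEC =====
-- Pre_ excludes negative n — there B's '1 << n' naturally raises ValueError while A
-- happens to return [0] (and only when start = 0) — and start outside [0, 2^n),
-- where A's rotation loop never terminates (A diverges, returning nothing).
def Pre_circularPermutation (n : Int) (start : Int) : Prop :=
  0 ≤ n ∧ 0 ≤ start ∧ start < 2 ^ n.toNat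
instance (n : Int) (start : Int) : Decidable (Pre_circularPermutation n start) := by
  unfold Pre_circularPermutation; infer_instance

def pvWitness_circularPermutation : Int × Int := (2, 3)

def Spec_circularPermutation (n : Int) (start : Int) (out : List Int) : Prop := out = circularPermutation_alt n start
instance (n : Int) (start : Int) (out : List Int) : Decidable (Spec_circularPermutation n start out) := by unfold Spec_circularPermutation; infer_instance

-- ===== CLAIM (what is proved, stated in full; the proofs are below) =====
def Claim_equal_circularPermutation : Prop := ∀ (n : Int) (start : Int), Dom_circularPermutation n start → Pre_circularPermutation n start → Spec_circularPermutation n start (circularPermutation n start)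

-- ===== LEMMAS AND PROOFS =====

-- Gray code of a natural number, and the abstract reflect-and-append list A builds
def pvGray (x : Nat) : Nat := x ^^^ (x >>> 1)

def pvGl : Nat → List Nat
  | 0 => [0]
  | m + 1 => pvGl m ++ (pvGl m).reverse.map (· + 2 ^ m)

def pvF (s : Nat) : Nat := pvInvLoop 0 s

theorem pvInvLoop_eq_xor (k s : Nat) : pvInvLoop k s = k ^^^ pvF s := by
  induction s using Nat.strong_induction_on generalizing k with
  | _ s ih =>
    by_cases h : s = 0
    · subst h; simp [pvInvLoop, pvF]
    · have hlt : s >>> 1 < s := by simp only [Nat.shiftRight_one]; omega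
      conv_lhs => rw [pvInvLoop, dif_neg h, ih _ hlt]
      conv_rhs => rw [pvF, pvInvLoop, dif_neg h, ih _ hlt]
      simp [Nat.xor_assoc]

theorem pvF_rec (s : Nat) : pvF s = s ^^^ pvF (s >>> 1) := by
  by_cases h : s = 0
  · subst h; simp [pvF, pvInvLoop]
  · rw [pvF, pvInvLoop, dif_neg h, pvInvLoop_eq_xor]; simp

-- B's while loop computes pvF (the inverse Gray map)
theorem pvInvLoop_start (s : Nat) : pvInvLoop s (s >>> 1) = pvF s := by
  rw [pvInvLoop_eq_xor]
  conv_rhs => rw [pvF_rec]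

theorem pvF_shiftRight (g : Nat) : (pvF g) >>> 1 = pvF (g >>> 1) := by
  induction g using Nat.strong_induction_on with
  | _ g ih =>
    by_cases h : g = 0
    · subst h; simp [pvF, pvInvLoop]
    · have hlt : g >>> 1 < g := by simp only [Nat.shiftRight_one]; omega
      rw [pvF_rec g, Nat.shiftRight_xor_distrib, ih _ hlt, ← pvF_rec]

theorem pvGray_pvF (g : Nat) : pvGray (pvF g) = g := by
  rw [pvGray, pvF_shiftRight, pvF_rec g, Nat.xor_assoc, Nat.xor_self, Nat.xor_zero]

theorem pvGray_shiftRight (x : Nat) : pvGray x >>> 1 = pvGray (x >>> 1) := by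
  rw [pvGray, pvGray, Nat.shiftRight_xor_distrib]

theorem pvF_pvGray (x : Nat) : pvF (pvGray x) = x := by
  induction x using Nat.strong_induction_on with
  | _ x ih =>
    by_cases h : x = 0
    · subst h; simp [pvF, pvGray, pvInvLoop]
    · have hlt : x >>> 1 < x := by simp only [Nat.shiftRight_one]; omega
      rw [pvF_rec, pvGray_shiftRight, ih _ hlt, pvGray, Nat.xor_assoc, Nat.xor_self,
        Nat.xor_zero]

theorem pvF_lt (m g : Nat) (h : g < 2 ^ m) : pvF g < 2 ^ m := by
  induction g using Nat.strong_induction_on with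
  | _ g ih =>
    by_cases h0 : g = 0
    · subst h0; simpa [pvF, pvInvLoop] using h
    · have hlt : g >>> 1 < g := by simp only [Nat.shiftRight_one]; omega
      rw [pvF_rec]
      exact Nat.xor_lt_two_pow h (ih _ hlt (by simp only [Nat.shiftRight_one]; omega))

theorem pvGray_lt (m x : Nat) (h : x < 2 ^ m) : pvGray x < 2 ^ m := by
  exact Nat.xor_lt_two_pow h (by simp only [Nat.shiftRight_one]; omega)

-- disjoint-bit addition and complement as xor
theorem pvTwoPow_add_eq_xor (m t : Nat) (h : t < 2 ^ m) : 2 ^ m + t = 2 ^ m ^^^ t := by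
  apply Nat.eq_of_testBit_eq; intro i
  rcases lt_trichotomy i m with hi|hi|hi
  · simp [Nat.testBit_xor, Nat.testBit_two_pow_add_gt hi, Ne.symm (Nat.ne_of_lt hi)]
  · subst hi; simp [Nat.testBit_xor, Nat.testBit_two_pow_add_eq, Nat.testBit_lt_two_pow h]
  · have h1 : 2 ^ m + t < 2 ^ i := by
      have h2 : 2 ^ (m + 1) ≤ 2 ^ i := Nat.pow_le_pow_right (by norm_num) hi
      have h3 := Nat.pow_lt_pow_succ (a := 2) (n := m) (by norm_num)
      omega
    simp [Nat.testBit_lt_two_pow h1, Nat.testBit_xor, Nat.ne_of_lt hi,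
      Nat.testBit_lt_two_pow (lt_trans h (Nat.pow_lt_pow_right (by norm_num) hi))]

theorem pvCompl_eq_xor (m t : Nat) (h : t < 2 ^ m) : 2 ^ m - 1 - t = (2 ^ m - 1) ^^^ t := by
  apply Nat.eq_of_testBit_eq; intro i
  have e : 2 ^ m - 1 - t = 2 ^ m - (t + 1) := by omega
  rw [e, Nat.testBit_two_pow_sub_succ h, Nat.testBit_xor, Nat.testBit_two_pow_sub_one]
  cases Nat.decLt i m with
  | isTrue hi => simp [hi]
  | isFalse hi =>
    have ht : t < 2 ^ i := lt_of_lt_of_le h (Nat.pow_le_pow_right (by norm_num) (by omega))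
    simp [hi, Nat.testBit_lt_two_pow ht]

-- the Gray reflection identity behind A's doubling step
theorem pvGray_reflect (m t : Nat) (h : t < 2 ^ m) :
    pvGray (2 ^ m + t) = 2 ^ m + pvGray (2 ^ m - 1 - t) := by
  cases m with
  | zero =>
    have : t = 0 := by omega
    subst this; decide
  | succ m' =>
    have hpos : 0 < 2 ^ (m' + 1) := Nat.two_pow_pos _
    have hc : 2 ^ (m' + 1) - 1 - t < 2 ^ (m' + 1) := by omega
    have h2 : pvGray (2 ^ (m' + 1) - 1 - t) < 2 ^ (m' + 1) := pvGray_lt _ _ hc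
    rw [pvTwoPow_add_eq_xor _ _ h, pvTwoPow_add_eq_xor _ _ h2, pvCompl_eq_xor _ _ h]
    unfold pvGray
    rw [Nat.shiftRight_xor_distrib, Nat.shiftRight_xor_distrib]
    have hp : (2 : Nat) ^ (m' + 1) = 2 ^ m' + 2 ^ m' := by rw [pow_succ]; omega
    have hpos' : 0 < 2 ^ m' := Nat.two_pow_pos _
    have e1 : (2 : Nat) ^ (m' + 1) >>> 1 = 2 ^ m' := by
      simp only [Nat.shiftRight_one]; omega
    have e2 : ((2 : Nat) ^ (m' + 1) - 1) >>> 1 = 2 ^ m' - 1 := by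
      simp only [Nat.shiftRight_one]; omega
    have e3 : (2 : Nat) ^ (m' + 1) - 1 = 2 ^ m' ^^^ (2 ^ m' - 1) := by
      rw [← pvTwoPow_add_eq_xor m' (2 ^ m' - 1) (by omega)]; omega
    rw [e1, e2, e3]
    simp [Nat.xor_comm, Nat.xor_left_comm]

theorem pvGl_eq (m : Nat) : pvGl m = (List.range (2 ^ m)).map pvGray := by
  induction m with
  | zero => decide
  | succ m ih =>
    have hp : (2 : Nat) ^ (m + 1) = 2 ^ m + 2 ^ m := by rw [pow_succ]; omega
    rw [pvGl, ih, hp, List.range_add, List.map_append, List.map_map]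
    congr 1
    apply List.ext_getElem
    · simp
    · intro i h1 h2
      have hi : i < 2 ^ m := by simpa using h1
      simp only [List.getElem_map, List.getElem_range, List.getElem_reverse, Function.comp_apply,
        List.length_map, List.length_range]
      rw [pvGray_reflect m i hi]
      rw [Nat.add_comm]

-- A's inner loop reads only the original prefix of the growing list
theorem pvFold_read (c : Int) : ∀ (js : List Int) (r0 r : List Int),
    (∀ j ∈ js, 0 ≤ j ∧ j < (r0.length : Int)) → r0 <+: r →
    js.foldl (fun acc j => acc ++ [PySem.List.pyGetD acc j 0 + c]) r
      = r ++ js.map (fun j => PySem.List.pyGetD r0 j 0 + c) := by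
  intro js
  induction js with
  | nil => intro r0 r _ _; simp
  | cons j js ih =>
    intro r0 r hb hpre
    obtain ⟨h0, h1⟩ := hb j (by simp)
    have hlen : r0.length ≤ r.length := hpre.length_le
    have hget : PySem.List.pyGetD r j 0 = PySem.List.pyGetD r0 j 0 := by
      rw [PySem.List.pyGetD_eq_getElem r 0 h0 (by push_cast; omega),
        PySem.List.pyGetD_eq_getElem r0 0 h0 h1]
      exact (hpre.getElem (by omega)).symm
    simp only [List.foldl_cons, hget]
    rw [ih r0 _ (fun x hx => hb x (by simp [hx])) (hpre.trans (List.prefix_append _ _))]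
    simp

-- A's inner loop appends the reversed, shifted copy
theorem pvAInner_eq (c : Int) (r0 : List Int) :
    pvAInner c r0 = r0 ++ r0.reverse.map (· + c) := by
  unfold pvAInner
  rw [PySem.List.pyRange_neg_one]
  have ht : ((r0.length : Int) - 1 - (-1)).toNat = r0.length := by omega
  rw [ht, List.foldl_map]
  have := pvFold_read c
    ((List.range r0.length).map fun (k : Nat) => (r0.length : Int) - 1 - (k : Int)) r0 r0
    (by
      intro j hj
      simp only [List.mem_map, List.mem_range] at hj
      obtain ⟨k, hk, rfl⟩ := hj
      refine ⟨by omega, by omega⟩)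
    (List.prefix_refl r0)
  rw [List.foldl_map] at this
  rw [this, List.map_map]
  congr 1
  apply List.ext_getElem
  · simp
  · intro i h1 h2
    have hi : i < r0.length := by simpa using h1
    simp only [List.getElem_map, List.getElem_range, List.getElem_reverse, Function.comp_apply]
    rw [PySem.List.pyGetD_eq_getElem r0 0 (by omega) (by push_cast; omega)]
    congr 2
    omega

-- A's outer loop builds pvGl
theorem pvOuter_eq (m : Nat) :
    (PySem.List.pyRange 0 (m : Int) 1).foldl (fun r i => pvAInner (1 <<< i.toNat) r) [0]
      = (pvGl m).map Int.ofNat := by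
  induction m with
  | zero => simp [PySem.List.pyRange_one_eq_nil, pvGl]
  | succ m ih =>
    have hc : ((m + 1 : Nat) : Int) = (m : Int) + 1 := by push_cast; ring
    rw [hc, PySem.List.pyRange_one_succ_right (by positivity), List.foldl_append, ih]
    simp only [List.foldl_cons, List.foldl_nil]
    rw [pvAInner_eq, pvGl]
    simp only [Int.toNat_natCast, Nat.one_shiftLeft]
    simp only [List.map_append, List.map_reverse, List.map_map]
    congr 2

-- A's rotation loop lands on the first occurrence of start
theorem pvARot_eq (start : Int) : ∀ (k : Nat) (L : List Int) (f : Nat)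
    (hk : k < L.length), k < f →
    (∀ i (hi : i < L.length), i < k → L[i] ≠ start) → L[k] = start →
    pvARot f L start = L.drop k ++ L.take k := by
  intro k
  induction k with
  | zero =>
    intro L f hk hf _ hs
    obtain ⟨h, t, rfl⟩ : ∃ h t, L = h :: t := by
      cases L with
      | nil => simp at hk
      | cons h t => exact ⟨h, t, rfl⟩
    obtain ⟨f', rfl⟩ : ∃ f', f = f' + 1 := ⟨f - 1, by omega⟩
    simp only [List.getElem_cons_zero] at hs
    simp [pvARot, hs]
  | succ k ih =>
    intro L f hk hf hpre hs
    obtain ⟨h, t, rfl⟩ : ∃ h t, L = h :: t := by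
      cases L with
      | nil => simp at hk
      | cons h t => exact ⟨h, t, rfl⟩
    obtain ⟨f', rfl⟩ : ∃ f', f = f' + 1 := ⟨f - 1, by omega⟩
    have hk' : k < t.length := by simpa using hk
    have hne : h ≠ start := hpre 0 (by simp) (by omega)
    rw [pvARot, if_pos hne]
    rw [ih (t ++ [h]) f' (by simp; omega) (by omega)
      (by
        intro i hi hik
        rw [List.getElem_append_left (by omega)]
        exact hpre (i + 1) (by simp; omega) (by omega))
      (by
        rw [List.getElem_append_left hk']
        simpa using hs)]
    rw [List.drop_append_of_le_length (by omega), List.take_append_of_le_length (by omega)]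
    simp

-- rotating the image of range by k = indexing mod N
theorem pvRotate_map_range {α : Type} (g : Nat → α) (N k : Nat) (hk : k < N) :
    (List.range N).map (fun j => g ((k + j) % N))
      = ((List.range N).map g).drop k ++ ((List.range N).map g).take k := by
  apply List.ext_getElem
  · simp; omega
  · intro i h1 h2
    have hi : i < N := by simpa using h1
    simp only [List.getElem_map, List.getElem_range]
    by_cases hcase : i < N - k
    · rw [List.getElem_append_left (by simp; omega)]
      rw [List.getElem_drop, List.getElem_map, List.getElem_range]
      congr 1
      rw [Nat.mod_eq_of_lt (by omega)]
    · rw [List.getElem_append_right (by simp; omega)]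
      rw [List.getElem_take, List.getElem_map, List.getElem_range]
      congr 1
      have e1 : (k + i) % N = k + i - N := by
        rw [Nat.mod_eq_sub_mod (by omega), Nat.mod_eq_of_lt (by omega)]
      simp only [List.length_drop, List.length_map, List.length_range]
      omega

-- ===== VERDICT (by name: the statement is the Claim_ definition above) =====
theorem circularPermutation_spec : Claim_equal_circularPermutation := by
  intro n start _ hpre
  obtain ⟨hn, hs, hlt⟩ := hpre
  unfold Spec_circularPermutation circularPermutation circularPermutation_alt
  set m := n.toNat with hm
  set s := start.toNat with hsd
  have hn' : (m : Int) = n := Int.toNat_of_nonneg hn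
  have hs' : (s : Int) = start := Int.toNat_of_nonneg hs
  have hsN : s < 2 ^ m := by
    have : ((s : Int)) < ((2 ^ m : Nat) : Int) := by push_cast; omega
    exact_mod_cast this
  have hk : pvF s < 2 ^ m := pvF_lt m s hsN
  -- A's list is the map of pvGl
  rw [← hn', pvOuter_eq m, pvGl_eq m]
  rw [List.map_map]
  set L := (List.range (2 ^ m)).map (Int.ofNat ∘ pvGray) with hL
  have hlen : L.length = 2 ^ m := by simp [hL]
  -- evaluate A's rotation loop
  have hA : pvARot L.length L start = L.drop (pvF s) ++ L.take (pvF s) := by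
    apply pvARot_eq start (pvF s) L L.length (by omega) (by omega)
    · intro i hi hik
      simp only [hL, List.getElem_map, List.getElem_range, Function.comp_apply,
        Int.ofNat_eq_natCast]
      intro hcontra
      have hg : pvGray i = s := by exact_mod_cast hcontra.trans hs'.symm
      have : i = pvF s := by rw [← hg, pvF_pvGray]
      omega
    · simp only [hL, List.getElem_map, List.getElem_range, Function.comp_apply,
        Int.ofNat_eq_natCast]
      rw [pvGray_pvF]
      exact hs'
  rw [hA]
  -- evaluate B
  simp only [pvInvLoop_start, Nat.one_shiftLeft]
  rw [hL, ← pvRotate_map_range (Int.ofNat ∘ pvGray) (2 ^ m) (pvF s) hk]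
  simp [pvGray, Int.ofNat_eq_natCast]
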